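-- pv_equiv track=rewrite | github.com/adumlouie/323-SyntaxAnalyzer-A2 | lexer.py | isID
-- ===== SOURCE A (Python) =====
-- def isID(input):
--     # transition states
--     transition = {
--         "letter": {
--             "A": "B",
--             "B": "C",
--             "C": "C",
--             "D": "C",
--             "E": "E" # sink state to account for empty state
--         },
--         "digit": {
--             "A": "E",
--             "B": "D",
--             "C": "D",
--             "D": "D",
--             "E": "E" # sink state to account for empty state
--         }
--     }
--
--     # declartion of the DFAs definitions
--     accepting = ["B", "C"]
--     starting_state = "A"
--     legal_letters = set("abcdefghijklmnopqrstuvwxyzABCDEFGHIJKLMNOPQRSTUVWXYZ")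
--     legal_digits = set("0123456789")
--     current = starting_state
--
--     # goes through the input string and follows the transition table
--     for ch in input:
--         # if input = l
--         if ch in legal_letters:
--             current = transition["letter"][current]
--         # if input = d
--         elif ch in legal_digits:
--             current = transition["digit"][current]
--         else:
--         # neither letter or digit
--             return False
--     if current in accepting:
--         return True
--     else:
--         return False
-- ===== SOURCE B (Python) =====
-- def isID(input):
--     letters = set("abcdefghijklmnopqrstuvwxyzABCDEFGHIJKLMNOPQRSTUVWXYZ")
--     digits = set("0123456789")
--     if not input:
--         return False
--     return (input[0] in letters
--             and input[-1] in letters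
--             and all(ch in letters or ch in digits for ch in input))
-- ===== Notes on version B (the rewrite author's own statement) =====
-- stated objective: simpler
-- what changed: Replaced the DFA transition-table simulation with a direct characterization: non-empty, first and last characters are ASCII letters, and every character is an ASCII letter or digit.
import Mathlib
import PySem

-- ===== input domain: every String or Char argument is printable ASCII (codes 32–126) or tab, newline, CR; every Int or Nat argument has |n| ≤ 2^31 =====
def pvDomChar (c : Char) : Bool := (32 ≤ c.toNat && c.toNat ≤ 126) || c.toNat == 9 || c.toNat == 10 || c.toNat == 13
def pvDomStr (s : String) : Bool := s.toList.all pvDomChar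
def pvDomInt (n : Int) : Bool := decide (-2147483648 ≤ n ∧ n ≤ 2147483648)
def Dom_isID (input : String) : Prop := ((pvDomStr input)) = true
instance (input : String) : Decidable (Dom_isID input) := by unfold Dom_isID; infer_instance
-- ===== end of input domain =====

-- B replaces A's DFA transition-table simulation by a direct check (non-empty, first/last
-- char an ASCII letter, all chars ASCII letters or digits); objective: simpler.

-- ===== PORT A =====
-- A's transition dicts, accepting list and character sets, as module-level helpers
def aTransLetter : PySem.Dict String String :=
  PySem.Dict.ofList [("A","B"),("B","C"),("C","C"),("D","C"),("E","E")]
def aTransDigit : PySem.Dict String String :=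
  PySem.Dict.ofList [("A","E"),("B","D"),("C","D"),("D","D"),("E","E")]
def aAccepting : List String := ["B","C"]
def aLetters : PySem.Set Char :=
  PySem.Set.ofList "abcdefghijklmnopqrstuvwxyzABCDEFGHIJKLMNOPQRSTUVWXYZ".toList
def aDigits : PySem.Set Char := PySem.Set.ofList "0123456789".toList

-- the for-loop with early return; dict lookups use getD (the key 'current' is always present)
def aLoop : List Char → String → Bool
  | [], current => aAccepting.contains current
  | ch :: rest, current =>
    if aLetters.contains ch then aLoop rest (PySem.Dict.getD aTransLetter current current)
    else if aDigits.contains ch then aLoop rest (PySem.Dict.getD aTransDigit current current)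
    else false

def isID (input : String) : Bool := aLoop input.toList "A"

-- ===== PORT B =====
def bLetters : PySem.Set Char :=
  PySem.Set.ofList "abcdefghijklmnopqrstuvwxyzABCDEFGHIJKLMNOPQRSTUVWXYZ".toList
def bDigits : PySem.Set Char := PySem.Set.ofList "0123456789".toList

def isID_alt (input : String) : Bool :=
  match input.toList with
  | [] => false
  | c :: rest =>
    bLetters.contains c
      && bLetters.contains (rest.getLastD c)
      && (c :: rest).all (fun ch => bLetters.contains ch || bDigits.contains ch)

-- ===== PRECONDITION & SPEC =====
def Spec_isID (input : String) (out : Bool) : Prop := out = isID_alt input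
instance (input : String) (out : Bool) : Decidable (Spec_isID input out) := by unfold Spec_isID; infer_instance

-- ===== CLAIM (what is proved, stated in full; the proofs are below) =====
def Claim_equal_isID : Prop := ∀ (input : String), Dom_isID input → Spec_isID input (isID input)

-- ===== LEMMAS AND PROOFS =====

-- proof-only abbreviations
def chAlnum (ch : Char) : Bool := aLetters.contains ch || aDigits.contains ch
-- "l ends in a letter" with default b on the empty list
def lastB (l : List Char) (b : Bool) : Bool :=
  match l.getLast? with
  | none => b
  | some c => aLetters.contains c
-- B's tail condition seen from states B/C (accepting on empty) and D (rejecting on empty)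
def chkBC (l : List Char) : Bool := l.all chAlnum && lastB l true
def chkD (l : List Char) : Bool := l.all chAlnum && lastB l false

theorem bLetters_eq : bLetters = aLetters := rfl
theorem bDigits_eq : bDigits = aDigits := rfl

theorem lastB_cons (ch : Char) (rest : List Char) (b : Bool) :
    lastB (ch :: rest) b = lastB rest (aLetters.contains ch) := by
  cases rest with
  | nil => simp [lastB]
  | cons x xs =>
      cases h : (x :: xs).getLast? with
      | none => simp at h
      | some c => simp [lastB, List.getLast?_cons_cons, h]

theorem lastB_getLastD (c : Char) (rest : List Char) :
    lastB rest (aLetters.contains c) = aLetters.contains (rest.getLastD c) := by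
  cases h : rest.getLast? with
  | none =>
      have : rest = [] := List.getLast?_eq_none_iff.mp h
      simp [this, lastB]
  | some d =>
      have hd : rest.getLastD c = d := by
        rw [List.getLastD_eq_getLast?, h]; rfl
      simp [lastB, h]

theorem aLoop_E (l : List Char) : aLoop l "E" = false := by
  induction l with
  | nil => decide
  | cons ch rest ih =>
      simp only [aLoop]
      split_ifs
      · rw [show PySem.Dict.getD aTransLetter "E" "E" = "E" from by decide]; exact ih
      · rw [show PySem.Dict.getD aTransDigit "E" "E" = "E" from by decide]; exact ih
      · rfl

theorem aLoop_BCD (l : List Char) :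
    aLoop l "B" = chkBC l ∧ aLoop l "C" = chkBC l ∧ aLoop l "D" = chkD l := by
  induction l with
  | nil => refine ⟨by decide, by decide, by decide⟩
  | cons ch rest ih =>
      obtain ⟨ihB, ihC, ihD⟩ := ih
      refine ⟨?_, ?_, ?_⟩ <;>
      · simp only [aLoop]
        split_ifs with h1 h2
        · have h1' : ch ∈ aLetters := by simpa using h1
          rw [show PySem.Dict.getD aTransLetter _ _ = "C" from by decide, ihC]
          simp [chkBC, chkD, chAlnum, lastB_cons, List.all_cons, h1']
        · have h1' : ch ∉ aLetters := by simpa using h1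
          have h2' : ch ∈ aDigits := by simpa using h2
          rw [show PySem.Dict.getD aTransDigit _ _ = "D" from by decide, ihD]
          simp [chkBC, chkD, chAlnum, lastB_cons, List.all_cons, h1', h2']
        · have h1' : ch ∉ aLetters := by simpa using h1
          have h2' : ch ∉ aDigits := by simpa using h2
          simp [chkBC, chkD, chAlnum, List.all_cons, h1', h2']

-- ===== VERDICT (by name: the statement is the Claim_ definition above) =====
theorem isID_spec : Claim_equal_isID := by
  intro input _
  unfold Spec_isID isID isID_alt
  cases hl : input.toList with
  | nil => decide
  | cons c rest =>
      simp only [aLoop, bLetters_eq, bDigits_eq]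
      have hfun : (fun ch => aLetters.contains ch || aDigits.contains ch) = chAlnum := rfl
      split_ifs with h1 h2
      · have h1' : c ∈ aLetters := by simpa using h1
        rw [show PySem.Dict.getD aTransLetter "A" "A" = "B" from by decide,
           (aLoop_BCD rest).1]
        rw [← lastB_getLastD c rest, hfun, h1]
        simp [chkBC, chAlnum, List.all_cons, h1', Bool.and_comm]
      · have h1' : c ∉ aLetters := by simpa using h1
        rw [show PySem.Dict.getD aTransDigit "A" "A" = "E" from by decide, aLoop_E]
        simp [h1']
      · have h1' : c ∉ aLetters := by simpa using h1
        simp [h1']
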